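-- pv_equiv track=rewrite | github.com/eldari77/nOVALi | novali-v5-standalone-rebuildv15/novali-v5-standalone-handoff/main.py | _parse_seed_list
-- ===== SOURCE A (Python) =====
-- def _parse_seed_list(seed_text: str | None, fallback_seed: int) -> list[int]:
--     if not seed_text:
--         return [int(fallback_seed)]
--     seeds: list[int] = []
--     seen = set()
--     for chunk in str(seed_text).split(","):
--         piece = chunk.strip()
--         if not piece:
--             continue
--         seed = int(piece)
--         if seed in seen:
--             continue
--         seen.add(seed)
--         seeds.append(seed)
--     return seeds or [int(fallback_seed)]
-- ===== SOURCE B (Python) =====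
-- def _parse_seed_list(seed_text: str | None, fallback_seed: int) -> list[int]:
--     if not seed_text:
--         return [int(fallback_seed)]
--     parsed = _parse_chunks(str(seed_text))
--     # keep each value only at its first occurrence: brute-force prefix scan, no auxiliary set
--     seeds = [x for i, x in enumerate(parsed) if x not in parsed[:i]]
--     return seeds or [int(fallback_seed)]
--
--
-- def _parse_chunks(text: str) -> list[int]:
--     head, sep, rest = text.partition(",")
--     piece = head.strip()
--     here = [int(piece)] if piece else []
--     return here + _parse_chunks(rest) if sep else here
-- ===== Notes on version B (the rewrite author's own statement) =====
-- stated objective: alternative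
-- what changed: Replaces split()+single loop with inline seen-set dedup by a recursive str.partition(",") descent that parses chunks as it peels them off, followed by a separate dedup pass that keeps a value only at its first occurrence via a prefix-membership scan (no set/dict at all).
import Mathlib
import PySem

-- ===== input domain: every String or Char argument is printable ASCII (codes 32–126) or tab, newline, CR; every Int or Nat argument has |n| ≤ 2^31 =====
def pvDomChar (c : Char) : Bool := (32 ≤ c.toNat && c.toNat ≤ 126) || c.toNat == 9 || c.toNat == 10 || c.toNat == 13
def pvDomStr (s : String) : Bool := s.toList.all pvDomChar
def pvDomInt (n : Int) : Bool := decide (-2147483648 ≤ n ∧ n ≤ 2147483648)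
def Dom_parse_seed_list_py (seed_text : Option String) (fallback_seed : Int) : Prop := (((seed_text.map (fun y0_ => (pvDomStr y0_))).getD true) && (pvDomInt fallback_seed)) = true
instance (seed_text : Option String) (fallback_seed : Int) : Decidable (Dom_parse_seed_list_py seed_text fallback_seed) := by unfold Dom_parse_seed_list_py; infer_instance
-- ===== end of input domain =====

-- B replaces A's split()+single loop with an inline seen-set by a recursive str.partition(",")
-- descent that parses chunks as it peels them off, then a separate first-occurrence dedup pass
-- using a prefix-membership scan (no set/dict); alternative decomposition, same behaviour.

-- ===== PORT A =====
-- one loop iteration of A: state is (seeds, seen); the `none` branch of ofStr? is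
-- Python's ValueError (excluded by Pre_), where the port just skips the piece.
def pvStepA (st : List Int × PySem.Set Int) (chunk : String) : List Int × PySem.Set Int :=
  let piece := PySem.Str.strip chunk
  if piece = "" then st
  else
    match PySem.Int.ofStr? piece with
    | none => st
    | some seed =>
        if PySem.Set.contains st.2 seed then st
        else (st.1 ++ [seed], PySem.Set.add st.2 seed)

def parse_seed_list_py (seed_text : Option String) (fallback_seed : Int) : List Int :=
  match seed_text with
  | none => [fallback_seed]
  | some s =>
      if s = "" then [fallback_seed]
      else
        let seeds := (((PySem.Str.split? s ",").getD []).foldl pvStepA ([], PySem.Set.empty)).1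
        if seeds = [] then [fallback_seed] else seeds

-- ===== PORT B =====
-- text.partition(","): (part before the first ',', rest after it if a ',' was found)
def pvPartitionComma (cs : List Char) : List Char × Option (List Char) :=
  match cs with
  | [] => ([], none)
  | c :: rest =>
      if c = ',' then ([], some rest)
      else
        let pr := pvPartitionComma rest
        (c :: pr.1, pr.2)

-- termination measure for the partition recursion (cited by pvParseChunks's decreasing_by)
lemma pvPartitionComma_rest_length : ∀ (cs rest : List Char), (pvPartitionComma cs).2 = some rest → rest.length < cs.length := by
  intro cs
  induction cs with
  | nil => intro rest h; simp [pvPartitionComma] at h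
  | cons c tl ih =>
      intro rest h
      by_cases hc : c = ','
      · subst hc
        simp [pvPartitionComma] at h
        rw [← h]
        exact Nat.lt_succ_self _
      · simp [pvPartitionComma, hc] at h
        exact Nat.lt_succ_of_lt (ih rest h)

-- _parse_chunks: recursive partition descent; the `none` branch of ofStr? is
-- Python's ValueError (excluded by Pre_), where the port contributes nothing.
def pvParseChunks (cs : List Char) : List Int :=
  let head := (pvPartitionComma cs).1
  let piece := PySem.Chars.strip head
  let here : List Int :=
    if piece = [] then []
    else
      match PySem.Int.ofStr? (String.ofList piece) with
      | some v => [v]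
      | none => []
  match h : (pvPartitionComma cs).2 with
  | some rest => here ++ pvParseChunks rest
  | none => here
termination_by cs.length
decreasing_by exact pvPartitionComma_rest_length cs rest h

def parse_seed_list_py_alt (seed_text : Option String) (fallback_seed : Int) : List Int :=
  match seed_text with
  | none => [fallback_seed]
  | some s =>
      if s = "" then [fallback_seed]
      else
        let parsed := pvParseChunks s.toList
        -- [x for i, x in enumerate(parsed) if x not in parsed[:i]]; parsed[:i] with 0 ≤ i is take i
        let seeds := (parsed.zipIdx.filter (fun p => !((parsed.take p.2).contains p.1))).map Prod.fst
        if seeds = [] then [fallback_seed] else seeds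

-- ===== PRECONDITION & SPEC =====
-- Pre_ excludes exactly the inputs on which A raises ValueError: a nonempty stripped
-- comma-piece that int() cannot parse.
def Pre_parse_seed_list_py (seed_text : Option String) (fallback_seed : Int) : Prop :=
  (match seed_text with
   | none => true
   | some s => ((PySem.Str.split? s ",").getD []).all
       (fun c => PySem.Str.strip c == "" || (PySem.Int.ofStr? (PySem.Str.strip c)).isSome)) = true
instance (seed_text : Option String) (fallback_seed : Int) : Decidable (Pre_parse_seed_list_py seed_text fallback_seed) := by unfold Pre_parse_seed_list_py; infer_instance

def pvWitness_parse_seed_list_py : Option String × Int := (some "1, 2,2, 3", 0)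

def Spec_parse_seed_list_py (seed_text : Option String) (fallback_seed : Int) (out : List Int) : Prop := out = parse_seed_list_py_alt seed_text fallback_seed
instance (seed_text : Option String) (fallback_seed : Int) (out : List Int) : Decidable (Spec_parse_seed_list_py seed_text fallback_seed out) := by unfold Spec_parse_seed_list_py; infer_instance

-- ===== CLAIM (what is proved, stated in full; the proofs are below) =====
def Claim_equal_parse_seed_list_py : Prop := ∀ (seed_text : Option String) (fallback_seed : Int), Dom_parse_seed_list_py seed_text fallback_seed → Pre_parse_seed_list_py seed_text fallback_seed → Spec_parse_seed_list_py seed_text fallback_seed (parse_seed_list_py seed_text fallback_seed)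

-- ===== LEMMAS AND PROOFS =====

-- what one comma-piece contributes to B's parsed list
def pvPieceInts (p : List Char) : List Int :=
  if PySem.Chars.strip p = [] then []
  else
    match PySem.Int.ofStr? (String.ofList (PySem.Chars.strip p)) with
    | some v => [v]
    | none => []

-- A's loop, started in the invariant state (l, l), yields exactly Set.add folded over
-- the parsed nonempty pieces.
lemma foldA_eq (pieces : List String) (l : List Int) :
    ((pieces.foldl pvStepA (l, l)).1)
      = (((pieces.map PySem.Str.strip).filter (fun p => p ≠ "")).filterMap
            PySem.Int.ofStr?).foldl PySem.Set.add l := by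
  induction pieces generalizing l with
  | nil => simp
  | cons c rest ih =>
      simp only [List.foldl_cons, List.map_cons, List.filter_cons]
      by_cases hp : PySem.Str.strip c = ""
      · simp [pvStepA, hp, ih]
      · simp only [hp, ne_eq, not_false_eq_true, decide_true, if_true, List.filterMap_cons]
        cases hof : PySem.Int.ofStr? (PySem.Str.strip c) with
        | none => simp [pvStepA, hp, hof, ih]
        | some seed =>
            simp only [List.foldl_cons]
            have hstep : pvStepA (l, l) c = (PySem.Set.add l seed, PySem.Set.add l seed) := by
              by_cases hc : seed ∈ l <;>
                simp [pvStepA, hp, hof, PySem.Set.add, PySem.Set.contains, hc]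
            rw [hstep, ih]

-- splitOn's fuelled worker, characterised through pvPartitionComma
lemma go_spec (n : ℕ) : ∀ (l : List Char), l.length ≤ n → ∀ (fuel : ℕ) (cur : List Char) (acc : List (List Char)), l.length < fuel →
    PySem.Chars.splitOn.go [','] fuel l cur acc
      = acc.reverse ++ ((cur.reverse ++ (pvPartitionComma l).1) ::
          (match (pvPartitionComma l).2 with
           | some r => PySem.Chars.splitOn r [',']
           | none => [])) := by
  induction n with
  | zero =>
      intro l hl fuel cur acc hf
      have hnil : l = [] := List.eq_nil_of_length_eq_zero (Nat.le_zero.mp hl)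
      subst hnil
      cases fuel with
      | zero => omega
      | succ f =>
          rw [PySem.Chars.splitOn.go]
          · simp [pvPartitionComma]
          · simp
  | succ n ih =>
      intro l hl fuel cur acc hf
      cases l with
      | nil =>
          cases fuel with
          | zero => omega
          | succ f =>
              rw [PySem.Chars.splitOn.go]
              · simp [pvPartitionComma]
              · simp
      | cons c rest =>
          cases fuel with
          | zero => omega
          | succ f =>
              have hrest_n : rest.length ≤ n := by
                simp only [List.length_cons] at hl; omega
              have hrest_f : rest.length < f := by
                simp only [List.length_cons] at hf; omega
              rw [PySem.Chars.splitOn.go]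
              by_cases hc : c = ','
              · subst hc
                have hpre : [','].isPrefixOf (',' :: rest) = true := by
                  simp [List.isPrefixOf]
                rw [if_pos hpre]
                rw [show List.drop [','].length (',' :: rest) = rest from rfl,
                    ih rest hrest_n f [] (cur.reverse :: acc) hrest_f]
                have hrec : PySem.Chars.splitOn rest [',']
                    = (pvPartitionComma rest).1 ::
                        (match (pvPartitionComma rest).2 with
                         | some r => PySem.Chars.splitOn r [',']
                         | none => []) := by
                  have h2 := ih rest hrest_n (rest.length + 1) [] [] (Nat.lt_succ_self _)
                  simpa [PySem.Chars.splitOn] using h2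
                simp [pvPartitionComma, hrec]
              · have hpre : [','].isPrefixOf (c :: rest) = false := by
                  simp only [List.isPrefixOf, Bool.and_true]
                  simpa using fun h => hc h.symm
                rw [if_neg (by simp [hpre])]
                rw [ih rest hrest_n f (c :: cur) acc hrest_f]
                simp [pvPartitionComma, hc]

lemma splitOn_comma_unfold (cs : List Char) :
    PySem.Chars.splitOn cs [',']
      = (pvPartitionComma cs).1 ::
          (match (pvPartitionComma cs).2 with
           | some r => PySem.Chars.splitOn r [',']
           | none => []) := by
  have h := go_spec cs.length cs le_rfl (cs.length + 1) [] [] (Nat.lt_succ_self _)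
  simpa [PySem.Chars.splitOn] using h

-- one unfolding of the recursive descent
lemma pvParseChunks_unfold (cs : List Char) :
    pvParseChunks cs
      = pvPieceInts (pvPartitionComma cs).1 ++
          (match (pvPartitionComma cs).2 with
           | some r => pvParseChunks r
           | none => []) := by
  rw [pvParseChunks]
  cases h : (pvPartitionComma cs).2 <;> simp [pvPieceInts]

-- B's recursive descent produces exactly the per-piece parses of the comma pieces
lemma parseChunks_eq (n : ℕ) : ∀ (cs : List Char), cs.length ≤ n →
    pvParseChunks cs = (PySem.Chars.splitOn cs [',']).flatMap pvPieceInts := by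
  induction n with
  | zero =>
      intro cs hl
      have hnil : cs = [] := List.eq_nil_of_length_eq_zero (Nat.le_zero.mp hl)
      subst hnil
      rw [splitOn_comma_unfold, pvParseChunks_unfold]
      simp [pvPartitionComma]
  | succ n ih =>
      intro cs hl
      rw [splitOn_comma_unfold, pvParseChunks_unfold]
      cases h : (pvPartitionComma cs).2 with
      | none => simp
      | some rest =>
          have hr := pvPartitionComma_rest_length cs rest h
          simp [ih rest (by omega)]

-- per-piece bridge between A's String-level stripping/parsing and pvPieceInts
lemma stringsToInts (ps : List String) :
    ((ps.map PySem.Str.strip).filter (fun p => p ≠ "")).filterMap PySem.Int.ofStr?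
      = ps.flatMap (fun p => pvPieceInts p.toList) := by
  induction ps with
  | nil => simp
  | cons p rest ih =>
      simp only [List.map_cons, List.filter_cons, List.flatMap_cons]
      have hstrip : PySem.Chars.strip p.toList = (PySem.Str.strip p).toList :=
        (PySem.Str.toList_strip p).symm
      by_cases hp : PySem.Str.strip p = ""
      · have hz : PySem.Chars.strip p.toList = [] := by rw [hstrip, hp]; rfl
        have hhead : pvPieceInts p.toList = [] := by simp [pvPieceInts, hz]
        simpa [hp, hhead] using ih
      · have hne : PySem.Chars.strip p.toList ≠ [] := by
          intro h0
          apply hp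
          apply String.ext
          simpa [PySem.Str.toList_strip] using h0
        have hhead : pvPieceInts p.toList
            = (match PySem.Int.ofStr? (PySem.Str.strip p) with
               | some v => ([v] : List Int)
               | none => []) := by
          rw [pvPieceInts, if_neg hne, hstrip, String.ofList_toList]
        cases hof : PySem.Int.ofStr? (PySem.Str.strip p) with
        | none => simpa [hp, hhead, hof] using ih
        | some v => simpa [hp, hhead, hof] using ih

-- B's prefix-membership dedup equals folding Set.add (first-occurrence dedup)
lemma dedup_lemma (l : List Int) : ∀ (pre acc : List Int), (∀ x : Int, x ∈ pre ↔ x ∈ acc) →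
    acc ++ (((l.zipIdx pre.length).filter
        (fun p => !(((pre ++ l).take p.2).contains p.1))).map Prod.fst)
      = l.foldl PySem.Set.add acc := by
  induction l with
  | nil => intro pre acc h; simp
  | cons c rest ih =>
      intro pre acc h
      have htake : (pre ++ c :: rest).take pre.length = pre := List.take_left
      have hassoc : pre ++ c :: rest = (pre ++ [c]) ++ rest := by simp
      have hlen : pre.length + 1 = (pre ++ [c]).length := by simp
      rw [List.zipIdx_cons, List.filter_cons]
      simp only [htake]
      by_cases hc : c ∈ pre
      · have hacc : c ∈ acc := (h c).mp hc
        have hadd : PySem.Set.add acc c = acc := by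
          simp [PySem.Set.add, PySem.Set.contains, hacc]
        rw [List.foldl_cons, hadd]
        have hmem : ∀ x : Int, x ∈ pre ++ [c] ↔ x ∈ acc := by
          intro x
          simp only [List.mem_append, List.mem_singleton]
          constructor
          · rintro (hx | rfl)
            · exact (h x).mp hx
            · exact hacc
          · intro hx; exact Or.inl ((h x).mpr hx)
        have hrec := ih (pre ++ [c]) acc hmem
        rw [← hlen, ← hassoc] at hrec
        simpa [hc] using hrec
      · have hacc : c ∉ acc := fun hx => hc ((h c).mpr hx)
        have hadd : PySem.Set.add acc c = acc ++ [c] := by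
          simp [PySem.Set.add, PySem.Set.contains, hacc]
        rw [List.foldl_cons, hadd]
        have hmem : ∀ x : Int, x ∈ pre ++ [c] ↔ x ∈ acc ++ [c] := by
          intro x
          simp only [List.mem_append, List.mem_singleton]
          exact or_congr (h x) Iff.rfl
        have hrec := ih (pre ++ [c]) (acc ++ [c]) hmem
        rw [← hlen, ← hassoc] at hrec
        simpa [hc] using hrec

-- ===== VERDICT (by name: the statement is the Claim_ definition above) =====
theorem parse_seed_list_py_spec : Claim_equal_parse_seed_list_py := by
  intro seed_text fallback_seed _ _
  unfold Spec_parse_seed_list_py parse_seed_list_py parse_seed_list_py_alt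
  cases seed_text with
  | none => rfl
  | some s =>
      by_cases hs : s = ""
      · simp [hs]
      · simp only [hs, if_false]
        have hsplit : ((PySem.Str.split? s ",").getD []).map String.toList
            = PySem.Chars.splitOn s.toList [','] := by
          have h := PySem.Str.split?_map s ","
          simp only [PySem.Chars.split?] at h
          cases hq : PySem.Str.split? s "," with
          | none => rw [hq] at h; simp at h
          | some ps => rw [hq] at h; simpa using h
        have hparsed : pvParseChunks s.toList
            = ((((PySem.Str.split? s ",").getD []).map PySem.Str.strip).filter
                (fun p => p ≠ "")).filterMap PySem.Int.ofStr? := by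
          rw [parseChunks_eq s.toList.length s.toList le_rfl, ← hsplit, stringsToInts,
              List.flatMap_map]
        have hA : ((((PySem.Str.split? s ",").getD []).foldl pvStepA ([], PySem.Set.empty)).1)
            = (pvParseChunks s.toList).foldl PySem.Set.add [] := by
          rw [show (PySem.Set.empty : PySem.Set Int) = ([] : List Int) from rfl, foldA_eq,
              hparsed]
        have hB : (((pvParseChunks s.toList).zipIdx.filter
              (fun p => !(((pvParseChunks s.toList).take p.2).contains p.1))).map Prod.fst)
            = (pvParseChunks s.toList).foldl PySem.Set.add [] := by
          have := dedup_lemma (pvParseChunks s.toList) [] [] (fun x => Iff.rfl)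
          simpa using this
        rw [hA, ← hB]
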